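-- pv_equiv track=rewrite | github.com/lunakk/test | Task1/hxy_user_similar.py | get_goods_num
-- ===== SOURCE A (Python) =====
-- def get_goods_num(user_goods_info):
--     goods_user = {}
--     for user, goods_list in user_goods_info.items():
--         for goods_id in goods_list:
--             if goods_id not in goods_user:
--                 goods_user.setdefault(goods_id, [])
--             goods_user[goods_id].append(user)
--     user_similar = {}
--     for goods_id, user_list in goods_user.items():
--         for u in user_list:
--             for v in user_list:
--                 if u == v:
--                     continue
--                 if u not in user_similar:
--                     user_similar.setdefault(u, {})
--                 if v not in user_similar[u]:
--                     user_similar[u].setdefault(v, 0)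
--                 user_similar[u][v] += 1
--     return user_similar
-- ===== SOURCE B (Python) =====
-- def _counts(vs):
--     return {v: vs.count(v) for v in dict.fromkeys(vs)}
--
--
-- def get_goods_num(user_goods_info):
--     occ = [(g, u) for u, gl in user_goods_info.items() for g in gl]
--     holders = {g: [u for h, u in occ if h == g]
--                for g in dict.fromkeys(h for h, _ in occ)}
--     events = [(u, v) for ul in holders.values() for u in ul for v in ul if u != v]
--     return {u: _counts([v for x, v in events if x == u])
--             for u in dict.fromkeys(x for x, _ in events)}
-- ===== Notes on version B (the rewrite author's own statement) =====
-- stated objective: alternative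
-- what changed: A builds an inverted good->users index and then mutates a nested dict-of-dicts with setdefault/increment inside a triple loop; B instead flattens the co-purchase pairs into one event list and produces the result purely by group-and-count comprehensions (ordered dedup of keys, then per-key filter and count), with no in-place dictionary mutation.
import Mathlib
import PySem

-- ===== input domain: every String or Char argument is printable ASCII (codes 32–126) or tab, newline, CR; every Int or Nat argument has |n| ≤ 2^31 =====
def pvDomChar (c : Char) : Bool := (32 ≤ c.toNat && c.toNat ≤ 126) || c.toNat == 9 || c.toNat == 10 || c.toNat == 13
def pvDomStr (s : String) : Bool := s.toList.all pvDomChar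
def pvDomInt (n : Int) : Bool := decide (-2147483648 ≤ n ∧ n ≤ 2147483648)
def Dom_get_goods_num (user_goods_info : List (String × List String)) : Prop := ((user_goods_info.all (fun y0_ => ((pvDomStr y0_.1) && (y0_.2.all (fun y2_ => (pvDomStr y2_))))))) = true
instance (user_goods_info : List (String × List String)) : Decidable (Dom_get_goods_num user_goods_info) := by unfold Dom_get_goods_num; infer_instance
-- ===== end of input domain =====

-- B replaces A's in-place nested-dict increment loops by a flat co-purchase event list that is
-- grouped and counted with comprehensions (objective: alternative; same insertion orders, no mutation).

-- ===== PORT A =====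
def get_goods_num (user_goods_info : List (String × List String)) : List (String × List (String × Int)) :=
  let goods_user : PySem.Dict String (List String) :=
    user_goods_info.foldl (fun goods_user ug =>
      ug.2.foldl (fun goods_user goods_id =>
        let gu := if goods_user.contains goods_id then goods_user else goods_user.setdefault goods_id []
        gu.modify goods_id [] (fun l => l ++ [ug.1])) goods_user) PySem.Dict.empty
  let user_similar : PySem.Dict String (PySem.Dict String Int) :=
    goods_user.items.foldl (fun user_similar gl =>
      gl.2.foldl (fun user_similar u =>
        gl.2.foldl (fun user_similar v =>
          if u == v then user_similar
          else
            let us := if user_similar.contains u then user_similar else user_similar.setdefault u PySem.Dict.empty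
            us.modify u PySem.Dict.empty (fun inner =>
              let inn := if inner.contains v then inner else inner.setdefault v 0
              inn.modify v 0 (fun n => n + 1))) user_similar) user_similar) PySem.Dict.empty
  user_similar.items.map (fun p => (p.1, p.2.items))

-- ===== PORT B =====
def pyCounts (vs : List String) : List (String × Int) :=
  (PySem.List.dedup vs).map (fun v => (v, (vs.count v : Int)))

def get_goods_num_alt (user_goods_info : List (String × List String)) : List (String × List (String × Int)) :=
  let occ : List (String × String) :=
    user_goods_info.flatMap (fun p => p.2.map (fun g => (g, p.1)))
  let holders : List (String × List String) :=
    (PySem.List.dedup (occ.map (fun p => p.1))).map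
      (fun g => (g, (occ.filter (fun p => p.1 == g)).map (fun p => p.2)))
  let events : List (String × String) :=
    holders.flatMap (fun gl => gl.2.flatMap (fun u =>
      (gl.2.filter (fun v => !(u == v))).map (fun v => (u, v))))
  (PySem.List.dedup (events.map (fun p => p.1))).map (fun u =>
    (u, pyCounts ((events.filter (fun p => p.1 == u)).map (fun p => p.2))))

-- ===== PRECONDITION & SPEC =====
def Spec_get_goods_num (user_goods_info : List (String × List String)) (out : List (String × List (String × Int))) : Prop := out = get_goods_num_alt user_goods_info
instance (user_goods_info : List (String × List String)) (out : List (String × List (String × Int))) : Decidable (Spec_get_goods_num user_goods_info out) := by unfold Spec_get_goods_num; infer_instance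

-- ===== CLAIM (what is proved, stated in full; the proofs are below) =====
def Claim_equal_get_goods_num : Prop := ∀ (user_goods_info : List (String × List String)), Dom_get_goods_num user_goods_info → Spec_get_goods_num user_goods_info (get_goods_num user_goods_info)

-- ===== LEMMAS AND PROOFS =====

-- the Python pattern "if k not in d: d.setdefault(k, dflt)" followed by an update of d[k]
-- is a single modify
theorem pv_collapse {κ ν : Type} [BEq κ] [LawfulBEq κ] (d : PySem.Dict κ ν) (k : κ) (dflt : ν) (f : ν → ν) :
    (if d.contains k then d else d.setdefault k dflt).modify k dflt f = d.modify k dflt f := by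
  by_cases h : d.contains k
  · simp [h]
  · simp only [Bool.not_eq_true] at h
    simp only [h, Bool.false_eq_true, if_false,
      PySem.Dict.setdefault_of_not_contains d dflt h]
    show (d.insert k dflt).insert k (f ((d.insert k dflt).getD k dflt)) = d.insert k (f (d.getD k dflt))
    rw [PySem.Dict.getD_insert_self, PySem.Dict.insert_insert_self,
      PySem.Dict.getD_of_not_contains d dflt h]

-- value at one key of a keyed modify-fold: fold of the updates over that key's payloads
theorem pv_getD_group {κ σ β : Type} [BEq κ] [LawfulBEq κ] [DecidableEq κ]
    (l : List (κ × β)) (f : σ → β → σ) (d0 : σ) (d : PySem.Dict κ σ) (c : κ) :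
    (l.foldl (fun d p => d.modify p.1 d0 (fun s => f s p.2)) d).getD c d0
      = ((l.filter (fun p => p.1 == c)).map (fun p => p.2)).foldl f (d.getD c d0) := by
  induction l generalizing d with
  | nil => rfl
  | cons p t ih =>
    simp only [List.foldl_cons, List.filter_cons]
    rw [ih]
    by_cases hc : p.1 = c
    · simp [hc]
    · have : (p.1 == c) = false := by simp [hc]
      simp [this, PySem.Dict.getD_modify, Ne.symm hc]

-- A's inner loop "for v in ul: if u == v: continue; step(u,v)" as a fold over filtered pairs
theorem pv_foldl_skip {α σ : Type} [BEq α] (u : α) (l : List α) (F : σ → α × α → σ) (s : σ) :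
    l.foldl (fun s v => if u == v then s else F s (u, v)) s
      = ((l.filter (fun v => !(u == v))).map (fun v => (u, v))).foldl F s := by
  induction l generalizing s with
  | nil => rfl
  | cons v t ih =>
    cases h : u == v <;> simp [h, ih]

def pvLstStep : PySem.Dict String (List String) → String × String → PySem.Dict String (List String) :=
  fun d p => d.modify p.1 [] (fun l => l ++ [p.2])

def pvPairStep : PySem.Dict String (PySem.Dict String Int) → String × String → PySem.Dict String (PySem.Dict String Int) :=
  fun us p => us.modify p.1 PySem.Dict.empty (fun inner => inner.modify p.2 0 (fun n => n + 1))

theorem pv_stage1 (info : List (String × List String)) :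
    info.foldl (fun gu ug => ug.2.foldl (fun gu g => gu.modify g [] (fun l => l ++ [ug.1])) gu) PySem.Dict.empty
      = (info.flatMap (fun p => p.2.map (fun g => (g, p.1)))).foldl pvLstStep PySem.Dict.empty := by
  rw [List.foldl_flatMap]
  congr 1
  funext gu ug
  rw [List.foldl_map]
  rfl

theorem pv_stage2 (items : List (String × List String)) :
    items.foldl (fun us gl =>
      gl.2.foldl (fun us u =>
        gl.2.foldl (fun us v =>
          if u == v then us
          else us.modify u PySem.Dict.empty (fun inner => inner.modify v 0 (fun n => n + 1))) us) us) PySem.Dict.empty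
      = (items.flatMap (fun gl => gl.2.flatMap (fun u =>
          (gl.2.filter (fun v => !(u == v))).map (fun v => (u, v))))).foldl pvPairStep PySem.Dict.empty := by
  rw [List.foldl_flatMap]
  congr 1
  funext us gl
  rw [List.foldl_flatMap]
  congr 1
  funext us u
  exact pv_foldl_skip u gl.2 pvPairStep us

theorem pv_items_stage1 (occ : List (String × String)) :
    (occ.foldl pvLstStep PySem.Dict.empty).items
      = (PySem.Set.ofList (occ.map (fun p => p.1))).map
          (fun g => (g, (occ.filter (fun p => p.1 == g)).map (fun p => p.2))) := by
  show ((occ.foldl (fun d p => d.modify p.1 [] (fun l => l ++ [p.2])) PySem.Dict.empty)).items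
      = (PySem.Set.ofList (occ.map (fun p => p.1))).map
          (fun g => (g, (occ.filter (fun p => p.1 == g)).map (fun p => p.2)))
  have hnd : ((occ.foldl (fun d p => d.modify p.1 [] (fun l => l ++ [p.2])) PySem.Dict.empty)).keys.Nodup :=
    PySem.Dict.nodup_keys_foldl_modify_key occ Prod.fst [] (fun _ p l => l ++ [p.2])
      PySem.Dict.empty PySem.Dict.nodup_keys_empty
  rw [PySem.Dict.items_eq_map_keys _ hnd []]
  have hkeys : ((occ.foldl (fun d p => d.modify p.1 [] (fun l => l ++ [p.2])) PySem.Dict.empty)).keys = PySem.Set.ofList (occ.map (fun p => p.1)) := by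
    rw [PySem.Dict.keys_foldl_modify_key occ Prod.fst [] (fun _ p l => l ++ [p.2]) PySem.Dict.empty]
    rfl
  rw [hkeys]
  apply List.map_congr_left
  intro g _
  rw [PySem.Dict.getD_foldl_modify_append occ PySem.Dict.empty g]
  simp [PySem.Dict.getD_empty]

theorem pv_items_stage2 (events : List (String × String)) :
    ((events.foldl pvPairStep PySem.Dict.empty).items).map (fun p => (p.1, p.2.items))
      = (PySem.Set.ofList (events.map (fun p => p.1))).map (fun u =>
          (u, pyCounts ((events.filter (fun p => p.1 == u)).map (fun p => p.2)))) := by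
  show ((events.foldl (fun us p => us.modify p.1 PySem.Dict.empty (fun inner => inner.modify p.2 0 (fun n => n + 1))) (PySem.Dict.empty : PySem.Dict String (PySem.Dict String Int)))).items.map (fun p => (p.1, p.2.items))
      = (PySem.Set.ofList (events.map (fun p => p.1))).map (fun u =>
          (u, pyCounts ((events.filter (fun p => p.1 == u)).map (fun p => p.2))))
  have hnd : ((events.foldl (fun us p => us.modify p.1 PySem.Dict.empty (fun inner => inner.modify p.2 0 (fun n => n + 1))) (PySem.Dict.empty : PySem.Dict String (PySem.Dict String Int)))).keys.Nodup :=
    PySem.Dict.nodup_keys_foldl_modify_key events Prod.fst PySem.Dict.empty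
      (fun _ p inner => inner.modify p.2 0 (fun n => n + 1))
      PySem.Dict.empty PySem.Dict.nodup_keys_empty
  rw [PySem.Dict.items_eq_map_keys _ hnd PySem.Dict.empty]
  have hkeys : ((events.foldl (fun us p => us.modify p.1 PySem.Dict.empty (fun inner => inner.modify p.2 0 (fun n => n + 1))) (PySem.Dict.empty : PySem.Dict String (PySem.Dict String Int)))).keys = PySem.Set.ofList (events.map (fun p => p.1)) := by
    rw [PySem.Dict.keys_foldl_modify_key events Prod.fst PySem.Dict.empty
      (fun _ p inner => inner.modify p.2 0 (fun n => n + 1)) PySem.Dict.empty]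
    rfl
  rw [hkeys, List.map_map]
  apply List.map_congr_left
  intro u _
  simp only [Function.comp]
  have hgetD : ((events.foldl (fun us p => us.modify p.1 PySem.Dict.empty (fun inner => inner.modify p.2 0 (fun n => n + 1))) (PySem.Dict.empty : PySem.Dict String (PySem.Dict String Int)))).getD u PySem.Dict.empty
      = PySem.Dict.counter ((events.filter (fun p => p.1 == u)).map (fun p => p.2)) := by
    have h := pv_getD_group events (fun inner v => inner.modify v 0 (fun n => n + 1)) PySem.Dict.empty (PySem.Dict.empty : PySem.Dict String (PySem.Dict String Int)) u
    rw [PySem.Dict.getD_empty] at h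
    rw [PySem.Dict.counter_eq_foldl]
    exact h
  rw [hgetD, PySem.Dict.items_counter]
  rfl

-- ===== VERDICT (by name: the statement is the Claim_ definition above) =====
theorem get_goods_num_spec : Claim_equal_get_goods_num := by
  intro info _
  show get_goods_num info = get_goods_num_alt info
  rw [get_goods_num, get_goods_num_alt]
  simp only [pv_collapse, pv_stage1, pv_stage2]
  rw [pv_items_stage1]
  rw [pv_items_stage2]
  rfl
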